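-- pv_equiv track=rewrite | github.com/vngonugondla/NYT-Connections-Solver | api.py | evaluate_groups
-- ===== SOURCE A (Python) =====
-- def evaluate_groups(predicted, expected):
--     matched = 0
--     used = set()
--     for pg in predicted:
--         for i, eg in enumerate(expected):
--             if i in used:
--                 continue
--             if pg == eg:
--                 matched += 1
--                 used.add(i)
--                 break
--     return matched
-- ===== SOURCE B (Python) =====
-- def evaluate_groups(predicted, expected):
--     # Multiset-intersection: count expected groups once (as tuples), then consume
--     # them from the counter; matched = size of the multiset intersection.
--     remaining = {}
--     for eg in expected:
--         k = tuple(eg)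
--         remaining[k] = remaining.get(k, 0) + 1
--     matched = 0
--     for pg in predicted:
--         k = tuple(pg)
--         if remaining.get(k, 0) > 0:
--             remaining[k] -= 1
--             matched += 1
--     return matched
-- ===== Notes on version B (the rewrite author's own statement) =====
-- stated objective: alternative
-- what changed: Replaces A's per-prediction linear scan over expected with a used-index set by a dict counter of expected groups built once, each prediction reduced to one lookup/decrement (multiset intersection).
import Mathlib
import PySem

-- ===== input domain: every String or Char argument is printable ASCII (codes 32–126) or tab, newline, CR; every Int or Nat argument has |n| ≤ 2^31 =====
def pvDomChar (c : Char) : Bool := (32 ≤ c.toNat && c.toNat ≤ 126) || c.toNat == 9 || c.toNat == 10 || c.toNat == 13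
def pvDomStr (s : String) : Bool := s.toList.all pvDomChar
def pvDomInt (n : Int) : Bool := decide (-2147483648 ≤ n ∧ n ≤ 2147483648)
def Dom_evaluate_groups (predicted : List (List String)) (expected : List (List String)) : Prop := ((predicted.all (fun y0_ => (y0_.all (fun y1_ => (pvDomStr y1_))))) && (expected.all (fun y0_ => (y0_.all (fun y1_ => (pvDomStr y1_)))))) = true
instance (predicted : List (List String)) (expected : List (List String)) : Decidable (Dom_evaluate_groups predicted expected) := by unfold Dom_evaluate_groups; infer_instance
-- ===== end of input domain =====

-- B replaces A's per-prediction scan of expected (skipping used indices) with a dict counter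
-- of expected groups built once, consumed by lookup/decrement (a different algorithm, same result).

-- ===== PORT A =====
-- inner loop 'for i, eg in enumerate(expected): if i in used: continue; if pg == eg: ... break'
-- returns the index it breaks at (some i) or none if the loop runs off the end
def pvInnerA (pg : List String) : List (List String) → Int → PySem.Set Int → Option Int
  | [], _, _ => none
  | eg :: rest, i, used =>
      if i ∈ used then pvInnerA pg rest (i + 1) used
      else if pg = eg then some i
      else pvInnerA pg rest (i + 1) used

-- one iteration of the outer 'for pg in predicted' loop; state = (matched, used)
def pvStepA (expected : List (List String)) (st : Int × PySem.Set Int) (pg : List String) : Int × PySem.Set Int :=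
  match pvInnerA pg expected 0 st.2 with
  | some i => (st.1 + 1, PySem.Set.add st.2 i)
  | none => st

def evaluate_groups (predicted : List (List String)) (expected : List (List String)) : Int :=
  (predicted.foldl (pvStepA expected) (0, PySem.Set.empty)).1

-- ===== PORT B =====
-- Python's tuple(eg) key is ported as the List String itself (tuple/list equality coincide).
-- 'remaining[k] -= 1' is an insert at a key known present (guard remaining.get(k,0) > 0).
def pvStepB (st : Int × PySem.Dict (List String) Int) (pg : List String) : Int × PySem.Dict (List String) Int :=
  if st.2.getD pg 0 > 0 then (st.1 + 1, st.2.insert pg (st.2.getD pg 0 - 1)) else st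

def evaluate_groups_alt (predicted : List (List String)) (expected : List (List String)) : Int :=
  let remaining := expected.foldl (fun d eg => d.insert eg (d.getD eg 0 + 1)) PySem.Dict.empty
  (predicted.foldl pvStepB (0, remaining)).1

-- ===== PRECONDITION & SPEC =====
def Spec_evaluate_groups (predicted : List (List String)) (expected : List (List String)) (out : Int) : Prop := out = evaluate_groups_alt predicted expected
instance (predicted : List (List String)) (expected : List (List String)) (out : Int) : Decidable (Spec_evaluate_groups predicted expected out) := by unfold Spec_evaluate_groups; infer_instance

-- ===== CLAIM (what is proved, stated in full; the proofs are below) =====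
def Claim_equal_evaluate_groups : Prop := ∀ (predicted : List (List String)) (expected : List (List String)), Dom_evaluate_groups predicted expected → Spec_evaluate_groups predicted expected (evaluate_groups predicted expected)

-- ===== LEMMAS AND PROOFS =====

-- number of still-unused positions of `l` (indexed from `i`) holding group `g`
def pvCnt (g : List String) : List (List String) → Int → PySem.Set Int → Int
  | [], _, _ => 0
  | eg :: rest, i, used => (if g = eg ∧ i ∉ used then 1 else 0) + pvCnt g rest (i + 1) used

theorem pvCnt_nonneg (g : List String) (l : List (List String)) (i : Int) (u : PySem.Set Int) :
    0 ≤ pvCnt g l i u := by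
  induction l generalizing i with
  | nil => simp [pvCnt]
  | cons eg rest ih =>
      simp only [pvCnt]
      have := ih (i + 1)
      split <;> omega

theorem pvInnerA_none_iff (pg : List String) (l : List (List String)) (i : Int) (u : PySem.Set Int) :
    pvInnerA pg l i u = none ↔ pvCnt pg l i u = 0 := by
  induction l generalizing i with
  | nil => simp [pvInnerA, pvCnt]
  | cons eg rest ih =>
      simp only [pvInnerA, pvCnt]
      by_cases hm : i ∈ u
      · simp [hm, ih]
      · by_cases he : pg = eg
        · have := pvCnt_nonneg pg rest (i + 1) u
          rw [if_neg hm, if_pos he, if_pos ⟨he, hm⟩]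
          constructor
          · intro hx; exact absurd hx (by simp)
          · intro hx; omega
        · have hne : ¬ (pg = eg ∧ i ∉ u) := fun hx => he hx.1
          rw [if_neg hm, if_neg he, if_neg hne, ih]
          omega

theorem pvInnerA_some_le (pg : List String) (l : List (List String)) (i j : Int) (u : PySem.Set Int)
    (h : pvInnerA pg l i u = some j) : i ≤ j := by
  induction l generalizing i with
  | nil => simp [pvInnerA] at h
  | cons eg rest ih =>
      simp only [pvInnerA] at h
      by_cases hm : i ∈ u
      · rw [if_pos hm] at h; have := ih (i + 1) h; omega
      · by_cases he : pg = eg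
        · rw [if_neg hm, if_pos he] at h
          exact le_of_eq (Option.some.inj h)
        · rw [if_neg hm, if_neg he] at h; have := ih (i + 1) h; omega

theorem pvMem_add_iff (u : PySem.Set Int) (i j : Int) (hne : i ≠ j) :
    i ∈ PySem.Set.add u j ↔ i ∈ u := by
  rw [PySem.Set.mem_add]
  constructor
  · rintro (h' | h')
    · exact h'
    · exact absurd h' hne
  · exact Or.inl

theorem pvCnt_add_lt (g : List String) (l : List (List String)) (i j : Int) (u : PySem.Set Int)
    (h : j < i) : pvCnt g l i (PySem.Set.add u j) = pvCnt g l i u := by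
  induction l generalizing i with
  | nil => simp [pvCnt]
  | cons eg rest ih =>
      simp only [pvCnt]
      rw [ih (i + 1) (by omega)]
      congr 1
      simp only [pvMem_add_iff u i j (by omega)]

theorem pvInnerA_some_cnt (pg : List String) (l : List (List String)) (i j : Int) (u : PySem.Set Int)
    (h : pvInnerA pg l i u = some j) (g : List String) :
    pvCnt g l i (PySem.Set.add u j) = pvCnt g l i u - (if g = pg then 1 else 0) := by
  induction l generalizing i with
  | nil => simp [pvInnerA] at h
  | cons eg rest ih =>
      simp only [pvInnerA] at h
      by_cases hm : i ∈ u
      · rw [if_pos hm] at h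
        have hi : i ∈ PySem.Set.add u j := (PySem.Set.mem_add u j i).mpr (Or.inl hm)
        simp only [pvCnt, ih (i + 1) h]
        rw [if_neg (fun hx : g = eg ∧ i ∉ PySem.Set.add u j => hx.2 hi),
            if_neg (fun hx : g = eg ∧ i ∉ u => hx.2 hm)]
        omega
      · by_cases he : pg = eg
        · rw [if_neg hm, if_pos he] at h
          have hji : j = i := (Option.some.inj h).symm
          subst hji
          have hjj : j ∈ PySem.Set.add u j := (PySem.Set.mem_add u j j).mpr (Or.inr rfl)
          simp only [pvCnt, pvCnt_add_lt g rest (j + 1) j u (by omega)]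
          rw [if_neg (fun hx : g = eg ∧ j ∉ PySem.Set.add u j => hx.2 hjj)]
          by_cases hg : g = pg
          · rw [if_pos hg, if_pos ⟨hg.trans he, hm⟩]; omega
          · have hge : ¬ g = eg := fun hx => hg (hx.trans he.symm)
            rw [if_neg hg, if_neg (fun hx : g = eg ∧ j ∉ u => hge hx.1)]; omega
        · rw [if_neg hm, if_neg he] at h
          have hj : i + 1 ≤ j := pvInnerA_some_le pg rest (i + 1) j u h
          simp only [pvCnt, ih (i + 1) h]
          simp only [pvMem_add_iff u i j (by omega)]
          omega

theorem pvCnt_empty (g : List String) (l : List (List String)) (i : Int) :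
    pvCnt g l i ([] : PySem.Set Int) = (l.count g : Int) := by
  induction l generalizing i with
  | nil => simp [pvCnt]
  | cons eg rest ih =>
      simp only [pvCnt, ih (i + 1), List.count_cons, List.not_mem_nil, not_false_iff, and_true]
      by_cases hg : g = eg
      · simp [hg]; omega
      · simp [hg]
        exact fun hx => hg hx.symm

theorem pvLoop (expected : List (List String)) (pred : List (List String)) :
    ∀ (m : Int) (u : PySem.Set Int) (d : PySem.Dict (List String) Int),
    (∀ g, d.getD g 0 = pvCnt g expected 0 u) →
    (pred.foldl (pvStepA expected) (m, u)).1 = (pred.foldl pvStepB (m, d)).1 := by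
  induction pred with
  | nil => intro m u d _; rfl
  | cons pg rest ih =>
      intro m u d hinv
      simp only [List.foldl_cons]
      rcases hcase : pvInnerA pg expected 0 u with _ | j
      · -- no match: both states unchanged
        have hz : pvCnt pg expected 0 u = 0 := (pvInnerA_none_iff pg expected 0 u).mp hcase
        have hd : ¬ d.getD pg 0 > 0 := by rw [hinv pg, hz]; omega
        simp only [pvStepA, hcase, pvStepB, if_neg hd]
        exact ih m u d hinv
      · -- match: matched+1; used gains j / counter decrements pg
        have hz : pvCnt pg expected 0 u ≠ 0 := by
          intro hx
          rw [← pvInnerA_none_iff, hcase] at hx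
          exact Option.some_ne_none j hx
        have hpos : d.getD pg 0 > 0 := by
          rw [hinv pg]
          have := pvCnt_nonneg pg expected 0 u
          omega
        simp only [pvStepA, hcase, pvStepB, if_pos hpos]
        refine ih (m + 1) (PySem.Set.add u j) (d.insert pg (d.getD pg 0 - 1)) ?_
        intro g
        rw [PySem.Dict.getD_insert, pvInnerA_some_cnt pg expected 0 j u hcase g]
        by_cases hg : g = pg
        · simp [hg, hinv pg]
        · simp [hg, hinv g]

-- the initial counter built by B equals pvCnt with an empty used-set
theorem pvCounter_inv (expected : List (List String)) (g : List String) :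
    (expected.foldl (fun d eg => d.insert eg (d.getD eg 0 + 1)) PySem.Dict.empty).getD g 0
      = pvCnt g expected 0 PySem.Set.empty := by
  rw [PySem.Dict.foldl_insert_getD_add_one_eq_counter, PySem.Dict.getD_counter]
  exact (pvCnt_empty g expected 0).symm

-- ===== VERDICT (by name: the statement is the Claim_ definition above) =====
theorem evaluate_groups_spec : Claim_equal_evaluate_groups := by
  intro predicted expected _
  unfold Spec_evaluate_groups evaluate_groups evaluate_groups_alt
  exact pvLoop expected predicted 0 PySem.Set.empty _ (pvCounter_inv expected)
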